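-- pv_equiv track=rewrite | github.com/VarBench-SE/VIFagent | vif_agent/mutation/tex_mutant_creator.py | _find_scopes
-- ===== SOURCE A (Python) =====
-- def _find_scopes(code: str) -> list[list[tuple[int, int]]]:
--
--     possible_scope_mutant: list[list[tuple[int, int]]] = []
--
--     scope_stack = []
--     index_scoped = code.find(r"\scoped{")
--     index_scope = code.find(r"\begin{scope}")
--     if index_scope == -1 and index_scoped == -1:
--         return []
--     i = min(index_scope, index_scoped)
--
--     while i < len(code):
--         current_code = code[i:]
--         if current_code.startswith(r"\scoped{"):
--             scope_stack.append(("scoped", i))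
--             i += 8
--             continue
--         if current_code.startswith(r"\begin{scope}"):
--             scope_stack.append(("begin_scope", i))
--             i += 13
--             continue
--         if current_code.startswith("{"):
--             scope_stack.append(("ignored", i))
--             i += 1
--             continue
--         if len(scope_stack) > 0:
--             if current_code.startswith(r"}"):
--                 entering_scope = scope_stack.pop()
--                 i += 1
--                 if entering_scope[0] != "ignored":
--                     possible_scope_mutant.append([(entering_scope[1], i)])
--                 continue
--             if current_code.startswith(r"\end{scope}"):
--                 entering_scope = scope_stack.pop()
--                 i += 11
--                 possible_scope_mutant.append([(entering_scope[1], i)])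
--                 continue
--         i += 1
--     return possible_scope_mutant
-- ===== SOURCE B (Python) =====
-- # Two-phase re-implementation: tokenize once into (kind, start, end) spans, then
-- # reduce the token list with a scope stack.
--
-- _TOKENS = [
--     ("scoped", "\\scoped{"),
--     ("begin_scope", "\\begin{scope}"),
--     ("ignored", "{"),
--     ("close", "}"),
--     ("end", "\\end{scope}"),
-- ]
--
--
-- def _tokenize(code, i):
--     tokens = []
--     n = len(code)
--     while i < n:
--         rest = code[i:]
--         for kind, lit in _TOKENS:
--             if rest.startswith(lit):
--                 tokens.append((kind, i, i + len(lit)))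
--                 i += len(lit)
--                 break
--         else:
--             i += 1
--     return tokens
--
--
-- def _find_scopes(code):
--     index_scoped = code.find("\\scoped{")
--     index_scope = code.find("\\begin{scope}")
--     if index_scope == -1 and index_scoped == -1:
--         return []
--     result = []
--     stack = []
--     for kind, start, end in _tokenize(code, min(index_scope, index_scoped)):
--         if kind in ("scoped", "begin_scope", "ignored"):
--             stack.append((kind, start))
--         elif stack:
--             opener, opener_start = stack.pop()
--             if kind == "end" or opener != "ignored":
--                 result.append([(opener_start, end)])
--     return result
-- ===== Notes on version B (the rewrite author's own statement) =====
-- stated objective: alternative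
-- what changed: B separates scanning from scope bookkeeping: it first tokenizes the string once into a list of (kind, start, end) spans and then reduces that token list with the scope stack in a second pass, instead of A's single loop that interleaves startswith dispatch, stack-dependent control flow and output construction.
import Mathlib
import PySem

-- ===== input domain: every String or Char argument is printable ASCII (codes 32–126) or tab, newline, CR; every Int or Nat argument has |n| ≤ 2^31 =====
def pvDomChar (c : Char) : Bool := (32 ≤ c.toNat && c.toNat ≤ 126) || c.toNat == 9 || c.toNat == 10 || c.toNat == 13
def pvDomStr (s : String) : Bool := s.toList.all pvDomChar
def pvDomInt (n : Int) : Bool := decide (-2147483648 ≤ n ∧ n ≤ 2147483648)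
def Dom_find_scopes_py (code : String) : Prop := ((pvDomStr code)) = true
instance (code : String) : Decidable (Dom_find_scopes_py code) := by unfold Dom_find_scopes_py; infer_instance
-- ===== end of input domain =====

-- B re-implements A's fused scan as two phases (tokenize, then reduce the token
-- list with the scope stack); the return value is proved identical on all inputs.

-- ===== PORT A =====
-- termination measure fact both loops' recursion cites (kept tiny so audits stay fast)
theorem pvDec (L i k : Int) (h : i < L) (hk : 1 ≤ k) :
    (L + 1 - (i + k)).toNat < (L + 1 - i).toNat := by omega

def pvScopedLit : List Char := ['\\', 's', 'c', 'o', 'p', 'e', 'd', '{']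
def pvBeginLit : List Char := ['\\', 'b', 'e', 'g', 'i', 'n', '{', 's', 'c', 'o', 'p', 'e', '}']
def pvEndLit : List Char := ['\\', 'e', 'n', 'd', '{', 's', 'c', 'o', 'p', 'e', '}']

-- A's while-loop: position i, scope stack (top = head), accumulated output.
def pvLoopA (cs : List Char) (i : Int) (stack : List (String × Int))
    (acc : List (List (Int × Int))) : List (List (Int × Int)) :=
  if _h : i < (cs.length : Int) then
    let cur := PySem.List.slice cs (some i) none
    if PySem.Chars.startswith cur pvScopedLit then
      pvLoopA cs (i + 8) (("scoped", i) :: stack) acc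
    else if PySem.Chars.startswith cur pvBeginLit then
      pvLoopA cs (i + 13) (("begin_scope", i) :: stack) acc
    else if PySem.Chars.startswith cur ['{'] then
      pvLoopA cs (i + 1) (("ignored", i) :: stack) acc
    else
      match stack with
      | f :: rest =>
        if PySem.Chars.startswith cur ['}'] then
          pvLoopA cs (i + 1) rest
            (if f.1 ≠ "ignored" then acc ++ [[(f.2, i + 1)]] else acc)
        else if PySem.Chars.startswith cur pvEndLit then
          pvLoopA cs (i + 11) rest (acc ++ [[(f.2, i + 11)]])
        else pvLoopA cs (i + 1) (f :: rest) acc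
      | [] => pvLoopA cs (i + 1) stack acc
  else acc
termination_by (cs.length + 1 - i).toNat
decreasing_by all_goals exact pvDec _ _ _ _h (by decide)

def find_scopes_py (code : String) : List (List (Int × Int)) :=
  let cs := code.toList
  let index_scoped := PySem.Chars.find cs pvScopedLit
  let index_scope := PySem.Chars.find cs pvBeginLit
  if index_scope = -1 ∧ index_scoped = -1 then []
  else pvLoopA cs (min index_scope index_scoped) [] []

-- ===== PORT B =====
-- Phase 1: one scan producing the token list (kind, start, end).
def pvTokenize (cs : List Char) (i : Int) : List (String × Int × Int) :=
  if _h : i < (cs.length : Int) then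
    let rest := PySem.List.slice cs (some i) none
    if PySem.Chars.startswith rest pvScopedLit then
      ("scoped", i, i + 8) :: pvTokenize cs (i + 8)
    else if PySem.Chars.startswith rest pvBeginLit then
      ("begin_scope", i, i + 13) :: pvTokenize cs (i + 13)
    else if PySem.Chars.startswith rest ['{'] then
      ("ignored", i, i + 1) :: pvTokenize cs (i + 1)
    else if PySem.Chars.startswith rest ['}'] then
      ("close", i, i + 1) :: pvTokenize cs (i + 1)
    else if PySem.Chars.startswith rest pvEndLit then
      ("end", i, i + 11) :: pvTokenize cs (i + 11)
    else pvTokenize cs (i + 1)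
  else []
termination_by (cs.length + 1 - i).toNat
decreasing_by all_goals exact pvDec _ _ _ _h (by decide)

-- Phase 2: reducer step over one token; state = (scope stack, result).
def pvStep (st : List (String × Int) × List (List (Int × Int)))
    (t : String × Int × Int) : List (String × Int) × List (List (Int × Int)) :=
  if t.1 = "scoped" ∨ t.1 = "begin_scope" ∨ t.1 = "ignored" then
    ((t.1, t.2.1) :: st.1, st.2)
  else
    match st.1 with
    | [] => st
    | f :: rest =>
      (rest, if t.1 = "end" ∨ f.1 ≠ "ignored" then st.2 ++ [[(f.2, t.2.2)]] else st.2)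

def find_scopes_py_alt (code : String) : List (List (Int × Int)) :=
  let cs := code.toList
  let index_scoped := PySem.Chars.find cs pvScopedLit
  let index_scope := PySem.Chars.find cs pvBeginLit
  if index_scope = -1 ∧ index_scoped = -1 then []
  else (List.foldl pvStep ([], []) (pvTokenize cs (min index_scope index_scoped))).2

-- ===== PRECONDITION & SPEC =====
def Spec_find_scopes_py (code : String) (out : List (List (Int × Int))) : Prop := out = find_scopes_py_alt code
instance (code : String) (out : List (List (Int × Int))) : Decidable (Spec_find_scopes_py code out) := by unfold Spec_find_scopes_py; infer_instance

-- ===== CLAIM (what is proved, stated in full; the proofs are below) =====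
def Claim_equal_find_scopes_py : Prop := ∀ (code : String), Dom_find_scopes_py code → Spec_find_scopes_py code (find_scopes_py code)

-- ===== LEMMAS AND PROOFS =====

theorem pv_sw_of_ne_head (c d : Char) (l p : List Char) (h : c ≠ d) :
    PySem.Chars.startswith (c :: l) (d :: p) = false := by
  rw [Bool.eq_false_iff]
  intro hb
  exact h ((List.cons_prefix_cons.mp ((PySem.Chars.startswith_iff _ _).mp hb)).1.symm)

theorem pv_sw_single (c : Char) (l : List Char) :
    PySem.Chars.startswith (c :: l) [c] = true := by
  exact (PySem.Chars.startswith_iff _ _).mpr (List.cons_prefix_cons.mpr ⟨rfl, List.nil_prefix⟩)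

-- one skipped character (not one of \ { }): A advances by 1 regardless of stack
theorem pvLoopA_skip (cs : List Char) (i : Int) (c : Char) (t : List Char)
    (stack : List (String × Int)) (acc : List (List (Int × Int)))
    (hi : 0 ≤ i) (hd : cs.drop i.toNat = c :: t)
    (h1 : c ≠ '\\') (h2 : c ≠ '{') (h3 : c ≠ '}') :
    pvLoopA cs i stack acc = pvLoopA cs (i + 1) stack acc := by
  have hlt : i < (cs.length : Int) := by
    have : i.toNat < cs.length := by
      by_contra hle
      rw [List.drop_eq_nil_of_le (by omega)] at hd
      simp at hd
    omega
  rw [pvLoopA, dif_pos hlt]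
  have hcur : PySem.List.slice cs (some i) none = c :: t := by
    rw [PySem.List.slice_from cs hi, hd]
  simp only [hcur, pvScopedLit, pvBeginLit, pvEndLit,
    pv_sw_of_ne_head _ _ _ _ h1, pv_sw_of_ne_head _ _ _ _ h2, pv_sw_of_ne_head _ _ _ _ h3,
    Bool.false_eq_true, if_false]
  cases stack <;> rfl

-- A at an \end{scope} with empty stack walks through it char by char, pushing and
-- popping the inner { } pair, with no net effect: 10 steps from i+1 to i+11.
theorem pvLoopA_end_empty (cs : List Char) (i : Int) (acc : List (List (Int × Int)))
    (hi : 0 ≤ i) (hpre : pvEndLit <+: cs.drop i.toNat) :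
    pvLoopA cs (i + 1) [] acc = pvLoopA cs (i + 11) [] acc := by
  obtain ⟨t, ht⟩ := hpre
  have hd : cs.drop i.toNat = '\\' :: 'e' :: 'n' :: 'd' :: '{' :: 's' :: 'c' :: 'o' :: 'p' :: 'e' :: '}' :: t := by
    rw [← ht]; rfl
  have hlen : i.toNat + 11 ≤ cs.length := by
    have h1 := congrArg List.length hd
    simp [List.length_drop] at h1
    omega
  have dk : ∀ k : Nat, cs.drop (i.toNat + k) = List.drop k (cs.drop i.toNat) := by
    intro k; rw [List.drop_drop, Nat.add_comm]
  have d1 : cs.drop (i + 1).toNat = 'e' :: 'n' :: 'd' :: '{' :: 's' :: 'c' :: 'o' :: 'p' :: 'e' :: '}' :: t := by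
    rw [show (i + 1).toNat = i.toNat + 1 by omega, dk 1, hd]; rfl
  have d2 : cs.drop (i + 2).toNat = 'n' :: 'd' :: '{' :: 's' :: 'c' :: 'o' :: 'p' :: 'e' :: '}' :: t := by
    rw [show (i + 2).toNat = i.toNat + 2 by omega, dk 2, hd]; rfl
  have d3 : cs.drop (i + 3).toNat = 'd' :: '{' :: 's' :: 'c' :: 'o' :: 'p' :: 'e' :: '}' :: t := by
    rw [show (i + 3).toNat = i.toNat + 3 by omega, dk 3, hd]; rfl
  have d4 : cs.drop (i + 4).toNat = '{' :: 's' :: 'c' :: 'o' :: 'p' :: 'e' :: '}' :: t := by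
    rw [show (i + 4).toNat = i.toNat + 4 by omega, dk 4, hd]; rfl
  have d5 : cs.drop (i + 5).toNat = 's' :: 'c' :: 'o' :: 'p' :: 'e' :: '}' :: t := by
    rw [show (i + 5).toNat = i.toNat + 5 by omega, dk 5, hd]; rfl
  have d6 : cs.drop (i + 6).toNat = 'c' :: 'o' :: 'p' :: 'e' :: '}' :: t := by
    rw [show (i + 6).toNat = i.toNat + 6 by omega, dk 6, hd]; rfl
  have d7 : cs.drop (i + 7).toNat = 'o' :: 'p' :: 'e' :: '}' :: t := by
    rw [show (i + 7).toNat = i.toNat + 7 by omega, dk 7, hd]; rfl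
  have d8 : cs.drop (i + 8).toNat = 'p' :: 'e' :: '}' :: t := by
    rw [show (i + 8).toNat = i.toNat + 8 by omega, dk 8, hd]; rfl
  have d9 : cs.drop (i + 9).toNat = 'e' :: '}' :: t := by
    rw [show (i + 9).toNat = i.toNat + 9 by omega, dk 9, hd]; rfl
  have d10 : cs.drop (i + 10).toNat = '}' :: t := by
    rw [show (i + 10).toNat = i.toNat + 10 by omega, dk 10, hd]; rfl
  have s4 : pvLoopA cs (i + 4) [] acc = pvLoopA cs (i + 5) [("ignored", i + 4)] acc := by
    rw [pvLoopA, dif_pos (by omega : i + 4 < (cs.length : Int))]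
    have hcur : PySem.List.slice cs (some (i + 4)) none = '{' :: 's' :: 'c' :: 'o' :: 'p' :: 'e' :: '}' :: t := by
      rw [PySem.List.slice_from cs (by omega), d4]
    simp only [hcur, pvScopedLit, pvBeginLit,
      pv_sw_of_ne_head _ _ _ _ (by decide : '{' ≠ '\\'), pv_sw_single,
      Bool.false_eq_true, if_false, if_true]
    rw [show i + 4 + 1 = i + 5 by ring]
  have s10 : pvLoopA cs (i + 10) [("ignored", i + 4)] acc = pvLoopA cs (i + 11) [] acc := by
    rw [pvLoopA, dif_pos (by omega : i + 10 < (cs.length : Int))]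
    have hcur : PySem.List.slice cs (some (i + 10)) none = '}' :: t := by
      rw [PySem.List.slice_from cs (by omega), d10]
    simp only [hcur, pvScopedLit, pvBeginLit,
      pv_sw_of_ne_head _ _ _ _ (by decide : '}' ≠ '\\'),
      pv_sw_of_ne_head _ _ _ _ (by decide : '}' ≠ '{'), pv_sw_single,
      Bool.false_eq_true, if_false, if_true]
    simp only [ne_eq, not_true_eq_false, if_false]
    rw [show i + 10 + 1 = i + 11 by ring]
  calc pvLoopA cs (i + 1) [] acc
      = pvLoopA cs (i + 1 + 1) [] acc :=
        pvLoopA_skip cs (i + 1) 'e' _ [] acc (by omega) d1 (by decide) (by decide) (by decide)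
    _ = pvLoopA cs (i + 2 + 1) [] acc := by
        rw [show i + 1 + 1 = i + 2 by ring]
        exact pvLoopA_skip cs (i + 2) 'n' _ [] acc (by omega) d2 (by decide) (by decide) (by decide)
    _ = pvLoopA cs (i + 3 + 1) [] acc := by
        rw [show i + 2 + 1 = i + 3 by ring]
        exact pvLoopA_skip cs (i + 3) 'd' _ [] acc (by omega) d3 (by decide) (by decide) (by decide)
    _ = pvLoopA cs (i + 5) [("ignored", i + 4)] acc := by
        rw [show i + 3 + 1 = i + 4 by ring]; exact s4
    _ = pvLoopA cs (i + 5 + 1) [("ignored", i + 4)] acc :=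
        pvLoopA_skip cs (i + 5) 's' _ _ acc (by omega) d5 (by decide) (by decide) (by decide)
    _ = pvLoopA cs (i + 6 + 1) [("ignored", i + 4)] acc := by
        rw [show i + 5 + 1 = i + 6 by ring]
        exact pvLoopA_skip cs (i + 6) 'c' _ _ acc (by omega) d6 (by decide) (by decide) (by decide)
    _ = pvLoopA cs (i + 7 + 1) [("ignored", i + 4)] acc := by
        rw [show i + 6 + 1 = i + 7 by ring]
        exact pvLoopA_skip cs (i + 7) 'o' _ _ acc (by omega) d7 (by decide) (by decide) (by decide)
    _ = pvLoopA cs (i + 8 + 1) [("ignored", i + 4)] acc := by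
        rw [show i + 7 + 1 = i + 8 by ring]
        exact pvLoopA_skip cs (i + 8) 'p' _ _ acc (by omega) d8 (by decide) (by decide) (by decide)
    _ = pvLoopA cs (i + 9 + 1) [("ignored", i + 4)] acc := by
        rw [show i + 8 + 1 = i + 9 by ring]
        exact pvLoopA_skip cs (i + 9) 'e' _ _ acc (by omega) d9 (by decide) (by decide) (by decide)
    _ = pvLoopA cs (i + 11) [] acc := by
        rw [show i + 9 + 1 = i + 10 by ring]; exact s10

theorem pvMain (cs : List Char) : ∀ (n : Nat) (i : Int) (stack : List (String × Int))
    (acc : List (List (Int × Int))), -1 ≤ i → (cs.length + 1 - i).toNat ≤ n →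
    pvLoopA cs i stack acc = (List.foldl pvStep (stack, acc) (pvTokenize cs i)).2 := by
  intro n
  induction n with
  | zero =>
    intro i stack acc hi hm
    have hge : ¬ i < (cs.length : Int) := by omega
    rw [pvLoopA, pvTokenize, dif_neg hge, dif_neg hge]; rfl
  | succ n ih =>
    intro i stack acc hi hm
    by_cases hlt : i < (cs.length : Int)
    case neg => rw [pvLoopA, pvTokenize, dif_neg hlt, dif_neg hlt]; rfl
    case pos =>
    rw [pvLoopA, pvTokenize, dif_pos hlt, dif_pos hlt]
    simp only []
    by_cases h1 : PySem.Chars.startswith (PySem.List.slice cs (some i) none) pvScopedLit = true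
    · rw [if_pos h1, if_pos h1, List.foldl_cons]
      have hstep : pvStep (stack, acc) ("scoped", i, i + 8) = (("scoped", i) :: stack, acc) := by
        simp [pvStep]
      rw [hstep]
      exact ih (i + 8) _ _ (by omega) (by omega)
    rw [if_neg h1, if_neg h1]
    by_cases h2 : PySem.Chars.startswith (PySem.List.slice cs (some i) none) pvBeginLit = true
    · rw [if_pos h2, if_pos h2, List.foldl_cons]
      have hstep : pvStep (stack, acc) ("begin_scope", i, i + 13) = (("begin_scope", i) :: stack, acc) := by
        simp [pvStep]
      rw [hstep]
      exact ih (i + 13) _ _ (by omega) (by omega)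
    rw [if_neg h2, if_neg h2]
    by_cases h3 : PySem.Chars.startswith (PySem.List.slice cs (some i) none) ['{'] = true
    · rw [if_pos h3, if_pos h3, List.foldl_cons]
      have hstep : pvStep (stack, acc) ("ignored", i, i + 1) = (("ignored", i) :: stack, acc) := by
        simp [pvStep]
      rw [hstep]
      exact ih (i + 1) _ _ (by omega) (by omega)
    rw [if_neg h3, if_neg h3]
    by_cases h4 : PySem.Chars.startswith (PySem.List.slice cs (some i) none) ['}'] = true
    · rw [if_pos h4, List.foldl_cons]
      cases stack with
      | nil =>
        have hstep : pvStep (([] : List (String × Int)), acc) ("close", i, i + 1) = ([], acc) := by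
          simp [pvStep]
        rw [hstep]
        exact ih (i + 1) _ _ (by omega) (by omega)
      | cons f rest =>
        have hstep : pvStep (f :: rest, acc) ("close", i, i + 1) =
            (rest, if f.1 ≠ "ignored" then acc ++ [[(f.2, i + 1)]] else acc) := by
          simp [pvStep]
        rw [hstep]
        simp only []
        rw [if_pos h4]
        exact ih (i + 1) _ _ (by omega) (by omega)
    rw [if_neg h4]
    by_cases h5 : PySem.Chars.startswith (PySem.List.slice cs (some i) none) pvEndLit = true
    · rw [if_pos h5, List.foldl_cons]
      cases stack with
      | nil =>
        have hstep : pvStep (([] : List (String × Int)), acc) ("end", i, i + 11) = ([], acc) := by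
          simp [pvStep]
        rw [hstep]
        have hi0 : 0 ≤ i := by
          rcases lt_or_ge i 0 with hneg | hpos
          · exfalso
            have hieq : i = -1 := by omega
            have hp := (PySem.Chars.startswith_iff _ _).mp h5
            have hlen11 : pvEndLit.length ≤ (PySem.List.slice cs (some i) none).length :=
              hp.length_le
            rw [hieq, PySem.List.slice_from_neg_one] at hlen11
            simp [pvEndLit] at hlen11
            omega
          · exact hpos
        have hpre : pvEndLit <+: cs.drop i.toNat := by
          have hp := (PySem.Chars.startswith_iff _ _).mp h5
          rwa [PySem.List.slice_from cs hi0] at hp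
        simp only []
        rw [pvLoopA_end_empty cs i acc hi0 hpre]
        exact ih (i + 11) _ _ (by omega) (by omega)
      | cons f rest =>
        have hstep : pvStep (f :: rest, acc) ("end", i, i + 11) =
            (rest, acc ++ [[(f.2, i + 11)]]) := by
          simp [pvStep]
        rw [hstep]
        simp only []
        rw [if_neg h4, if_pos h5]
        exact ih (i + 11) _ _ (by omega) (by omega)
    rw [if_neg h5]
    cases stack with
    | nil => exact ih (i + 1) _ _ (by omega) (by omega)
    | cons f rest =>
      simp only []
      rw [if_neg h4, if_neg h5]
      exact ih (i + 1) _ _ (by omega) (by omega)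

-- ===== VERDICT (by name: the statement is the Claim_ definition above) =====
theorem find_scopes_py_spec : Claim_equal_find_scopes_py := by
  intro code _
  unfold Spec_find_scopes_py find_scopes_py find_scopes_py_alt
  simp only []
  by_cases h : PySem.Chars.find code.toList pvBeginLit = -1 ∧ PySem.Chars.find code.toList pvScopedLit = -1
  · simp [h]
  · simp only [if_neg h]
    exact pvMain code.toList _ _ [] [] (le_min (PySem.Chars.neg_one_le_find _ _) (PySem.Chars.neg_one_le_find _ _)) le_rfl
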